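-- pv_equiv track=rewrite | github.com/Dlfmiee/CP125-Class-Repo | labs/lab05/exercise3/exercise3.py | find_bottleneck_index
-- ===== SOURCE A (Python) =====
-- def find_bottleneck_index(traceroute):
--     max_diff = 0
--     bottleneck_index = 0
--
--     for i in range(len(traceroute) - 1):
--         hop_number1, latency_in_ms1 = traceroute[i]
--         hop_number2, latency_in_ms2 = traceroute[i + 1]
--
--         difference_latency = latency_in_ms2 - latency_in_ms1
--         if difference_latency > max_diff:
--             max_diff = difference_latency
--             bottleneck_index = i
--
--     return bottleneck_index
-- ===== SOURCE B (Python) =====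
-- def find_bottleneck_index(traceroute):
--     # Divide and conquer: recursively find the leftmost maximal adjacent
--     # latency difference over halves of the index range, then apply the
--     # strictly-positive threshold once at the end.
--     n = len(traceroute)
--     if n < 2:
--         return 0
--
--     def diff(i):
--         return traceroute[i + 1][1] - traceroute[i][1]
--
--     def best(lo, length):
--         # leftmost maximal (diff, index) among diff indices [lo, lo+length), length >= 1
--         if length <= 1:
--             return (diff(lo), lo)
--         half = length // 2
--         left = best(lo, half)
--         right = best(lo + half, length - half)
--         return left if left[0] >= right[0] else right
--
--     d, i = best(0, n - 1)
--     return i if d > 0 else 0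
-- ===== Notes on version B (the rewrite author's own statement) =====
-- stated objective: alternative
-- what changed: Replaces A's single left-to-right running-max scan with a divide-and-conquer recursion that finds the leftmost maximal adjacent difference on each half and merges with a leftmost-preferring comparison, applying the positive-increase threshold once at the end.
import Mathlib
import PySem

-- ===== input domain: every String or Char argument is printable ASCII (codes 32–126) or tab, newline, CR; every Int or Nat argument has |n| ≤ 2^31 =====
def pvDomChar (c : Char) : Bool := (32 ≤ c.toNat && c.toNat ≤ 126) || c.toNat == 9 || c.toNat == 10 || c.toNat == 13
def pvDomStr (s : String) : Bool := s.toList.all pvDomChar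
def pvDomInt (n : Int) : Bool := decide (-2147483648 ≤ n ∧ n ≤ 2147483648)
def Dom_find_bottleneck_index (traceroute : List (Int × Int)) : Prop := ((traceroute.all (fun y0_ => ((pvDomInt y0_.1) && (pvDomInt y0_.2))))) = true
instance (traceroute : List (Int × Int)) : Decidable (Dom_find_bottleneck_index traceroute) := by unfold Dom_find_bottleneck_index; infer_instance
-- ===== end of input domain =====

-- B replaces A's running-max scan by a divide-and-conquer recursion (leftmost maximal
-- adjacent difference per half, merged preferring the left half), same O(n) cost.

-- ===== PORT A =====
-- for i in range(len(traceroute)-1): unpack traceroute[i], traceroute[i+1]; running max.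
-- Indexing is always in range here, so getD is exact for Python's traceroute[i].
def find_bottleneck_index (traceroute : List (Int × Int)) : Int :=
  (List.range (traceroute.length - 1)).foldl
    (fun (s : Int × Int) i =>
      let (_hop_number1, latency_in_ms1) := traceroute.getD i (0, 0)
      let (_hop_number2, latency_in_ms2) := traceroute.getD (i + 1) (0, 0)
      let difference_latency := latency_in_ms2 - latency_in_ms1
      if difference_latency > s.1 then (difference_latency, (i : Int)) else s)
    (0, 0) |>.2

-- ===== PORT B =====
-- def best(lo, length): leftmost maximal (diff, index) over diff indices [lo, lo+length);
-- called only with length ≥ 1 and indices in range, so getD is exact for Python's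
-- traceroute[i][1] / traceroute[i+1][1].
def pvAltBest (traceroute : List (Int × Int)) (lo len : Nat) : Int × Int :=
  if len ≤ 1 then
    ((traceroute.getD (lo + 1) (0, 0)).2 - (traceroute.getD lo (0, 0)).2, (lo : Int))
  else
    let half := len / 2
    let left := pvAltBest traceroute lo half
    let right := pvAltBest traceroute (lo + half) (len - half)
    if left.1 ≥ right.1 then left else right
termination_by len
decreasing_by all_goals omega

def find_bottleneck_index_alt (traceroute : List (Int × Int)) : Int :=
  let n := traceroute.length
  if n < 2 then 0
  else
    let r := pvAltBest traceroute 0 (n - 1)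
    if r.1 > 0 then r.2 else 0

-- ===== PRECONDITION & SPEC =====
def Spec_find_bottleneck_index (traceroute : List (Int × Int)) (out : Int) : Prop := out = find_bottleneck_index_alt traceroute
instance (traceroute : List (Int × Int)) (out : Int) : Decidable (Spec_find_bottleneck_index traceroute out) := by unfold Spec_find_bottleneck_index; infer_instance

-- ===== CLAIM (what is proved, stated in full; the proofs are below) =====
def Claim_equal_find_bottleneck_index : Prop := ∀ (traceroute : List (Int × Int)), Dom_find_bottleneck_index traceroute → Spec_find_bottleneck_index traceroute (find_bottleneck_index traceroute)

-- ===== LEMMAS AND PROOFS =====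

-- proof-only abstractions: the adjacent difference table, A's scan step, and the
-- "leftmost max of a segment" fold
def pvF (traceroute : List (Int × Int)) (i : Nat) : Int :=
  (traceroute.getD (i + 1) (0, 0)).2 - (traceroute.getD i (0, 0)).2

def pvStep (f : Nat → Int) (s : Int × Int) (i : Nat) : Int × Int :=
  if f i > s.1 then (f i, (i : Int)) else s

def pvLM (f : Nat → Int) (lo len : Nat) : Int × Int :=
  (List.range' lo len).foldl (pvStep f) (f lo, (lo : Int))

-- the key lemma: scanning a segment from any start state either keeps the state or
-- lands on the segment's leftmost max
lemma pvKey (f : Nat → Int) (lo : Nat) :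
    ∀ len, 1 ≤ len → ∀ s : Int × Int,
      (List.range' lo len).foldl (pvStep f) s =
        if (pvLM f lo len).1 > s.1 then pvLM f lo len else s := by
  intro len
  induction len with
  | zero => omega
  | succ n ih =>
    intro _ s
    by_cases hn : n = 0
    · subst hn
      simp [pvLM, List.range', pvStep]
    · have h1 : 1 ≤ n := by omega
      have hc : List.range' lo (n + 1) = List.range' lo n ++ [lo + n] := by
        simpa using List.range'_concat (s := lo) (n := n) (step := 1)
      have ihs := ih h1
      have hLM1 : pvLM f lo (n + 1) = pvStep f (pvLM f lo n) (lo + n) := by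
        simp [pvLM, hc, List.foldl_append]
      rw [hc, List.foldl_append]
      simp only [List.foldl_cons, List.foldl_nil]
      rw [ihs s, hLM1]
      unfold pvStep
      by_cases h2 : f (lo + n) > (pvLM f lo n).1 <;>
        by_cases h3 : (pvLM f lo n).1 > s.1 <;>
        by_cases h4 : f (lo + n) > s.1 <;>
        simp [h2, h3, h4] <;> omega

-- merge: the leftmost max of a concatenated segment is the left half's unless the
-- right half's is strictly larger
lemma pvMerge (f : Nat → Int) (lo a b : Nat) (hb : 1 ≤ b) :
    pvLM f lo (a + b) =
      if (pvLM f (lo + a) b).1 > (pvLM f lo a).1 then pvLM f (lo + a) b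
      else pvLM f lo a := by
  have happ : List.range' lo (a + b) = List.range' lo a ++ List.range' (lo + a) b := by
    simpa using (List.range'_append (s := lo) (m := a) (n := b) (step := 1)).symm
  have : pvLM f lo (a + b) =
      (List.range' (lo + a) b).foldl (pvStep f) (pvLM f lo a) := by
    unfold pvLM
    rw [happ, List.foldl_append]
  rw [this, pvKey f (lo + a) b hb]

-- B's divide-and-conquer computes pvLM on every nonempty segment
lemma pvAltBest_eq (traceroute : List (Int × Int)) :
    ∀ len, 1 ≤ len → ∀ lo, pvAltBest traceroute lo len = pvLM (pvF traceroute) lo len := by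
  intro len
  induction len using Nat.strong_induction_on with
  | _ len ih =>
    intro hlen lo
    by_cases h1 : len ≤ 1
    · have : len = 1 := by omega
      subst this
      rw [pvAltBest]
      simp [pvLM, List.range', pvStep, pvF]
    · rw [pvAltBest]
      simp only [h1, if_false]
      have hhalf1 : 1 ≤ len / 2 := by omega
      have hhalflt : len / 2 < len := by omega
      have hrest1 : 1 ≤ len - len / 2 := by omega
      have hrestlt : len - len / 2 < len := by omega
      rw [ih (len / 2) hhalflt hhalf1 lo,
          ih (len - len / 2) hrestlt hrest1 (lo + len / 2)]
      have := pvMerge (pvF traceroute) lo (len / 2) (len - len / 2) hrest1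
      rw [show len / 2 + (len - len / 2) = len by omega] at this
      rw [this]
      by_cases hcmp : (pvLM (pvF traceroute) lo (len / 2)).1 ≥
          (pvLM (pvF traceroute) (lo + len / 2) (len - len / 2)).1
      · rw [if_pos hcmp, if_neg (by omega)]
      · rw [if_neg hcmp, if_pos (by omega)]

-- A's loop body is pvStep over the difference table
lemma pvA_body (traceroute : List (Int × Int)) :
    (fun (s : Int × Int) i =>
      let (_hop_number1, latency_in_ms1) := traceroute.getD i (0, 0)
      let (_hop_number2, latency_in_ms2) := traceroute.getD (i + 1) (0, 0)
      let difference_latency := latency_in_ms2 - latency_in_ms1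
      if difference_latency > s.1 then (difference_latency, (i : Int)) else s)
      = pvStep (pvF traceroute) := by
  funext s i
  rcases h1 : traceroute.getD i (0, 0) with ⟨a1, b1⟩
  rcases h2 : traceroute.getD (i + 1) (0, 0) with ⟨a2, b2⟩
  simp only [h1, h2, pvStep, pvF]

-- ===== VERDICT (by name: the statement is the Claim_ definition above) =====
theorem find_bottleneck_index_spec : Claim_equal_find_bottleneck_index := by
  intro tr _
  unfold Spec_find_bottleneck_index find_bottleneck_index find_bottleneck_index_alt
  rw [pvA_body tr]
  by_cases hsmall : tr.length < 2
  · have h0 : tr.length - 1 = 0 := by omega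
    simp [h0, hsmall]
  · have h1 : 1 ≤ tr.length - 1 := by omega
    simp only [hsmall, if_false]
    rw [pvAltBest_eq tr (tr.length - 1) h1 0, List.range_eq_range',
        pvKey (pvF tr) 0 (tr.length - 1) h1 (0, 0)]
    by_cases hpos : (pvLM (pvF tr) 0 (tr.length - 1)).1 > 0
    · simp [hpos]
    · simp [hpos]
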